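-- pv_equiv track=rewrite | github.com/Skeeshaw/random_programs | python/wordle/wordletest.py | itemchecker
-- ===== SOURCE A (Python) =====
-- def itemchecker(list1,list2):
--
--     itemlist = []
--
--     for item in list1:
--
--         if item in list2:
--
--             commonletter = True
--             itemlist.append(item)
--
--             place_in_choice = list1.index(item)
--
--             place_in_ans = list2.index(item)
--
--     return itemlist, place_in_ans, place_in_choice
-- ===== SOURCE B (Python) =====
-- def itemchecker(list1, list2):
--     itemlist = [x for x in list1 if x in list2]
--     for item in reversed(list1):
--         if item in list2:
--             last = item
--             break
--     return itemlist, list2.index(last), list1.index(last)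
-- ===== Notes on version B (the rewrite author's own statement) =====
-- stated objective: simpler
-- what changed: Replaces A's loop that rewrites three tracking variables (recomputing both .index() scans on every hit) with a single comprehension for the common items plus one reverse scan with an early break, computing the two indices once at the end.
import Mathlib
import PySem

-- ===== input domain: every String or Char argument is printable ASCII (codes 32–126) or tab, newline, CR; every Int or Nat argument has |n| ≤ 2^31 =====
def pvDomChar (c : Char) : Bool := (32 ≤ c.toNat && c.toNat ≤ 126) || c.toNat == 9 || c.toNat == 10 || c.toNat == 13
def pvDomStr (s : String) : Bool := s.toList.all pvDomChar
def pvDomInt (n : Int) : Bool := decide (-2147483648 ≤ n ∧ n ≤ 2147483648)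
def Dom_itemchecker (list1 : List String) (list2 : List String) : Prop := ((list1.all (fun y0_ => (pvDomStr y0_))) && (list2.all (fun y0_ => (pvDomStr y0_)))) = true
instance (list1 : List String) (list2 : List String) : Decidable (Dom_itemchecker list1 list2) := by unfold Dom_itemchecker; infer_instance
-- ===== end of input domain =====

-- B is simpler: a single comprehension for the common items plus one reverse scan with an
-- early break for the last common item, instead of A's per-iteration index bookkeeping.
-- Both Pythons raise UnboundLocalError when the lists share no element; Pre_ excludes that.

-- ===== PORT A =====
-- A's loop keeps three variables; place_in_ans/place_in_choice start unbound, modelled as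
-- Option Int (none = unbound; final read with getD 0 is unreachable inside Pre_).
def itemchecker (list1 : List String) (list2 : List String) : List String × Int × Int :=
  let st := list1.foldl
    (fun (st : List String × Option Int × Option Int) item =>
      if list2.contains item then
        (st.1 ++ [item],
         (PySem.List.index? list1 item).map (fun k => (k : Int)),
         (PySem.List.index? list2 item).map (fun k => (k : Int)))
      else st)
    ([], none, none)
  (st.1, st.2.2.getD 0, st.2.1.getD 0)

-- ===== PORT B =====
-- reversed(list1) scan with break = find? on the reversed list; unbound `last` modelled as
-- the none branch (unreachable inside Pre_).
def itemchecker_alt (list1 : List String) (list2 : List String) : List String × Int × Int :=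
  let itemlist := list1.filter (fun x => list2.contains x)
  match list1.reverse.find? (fun x => list2.contains x) with
  | none => (itemlist, 0, 0)
  | some last =>
      (itemlist,
       (((PySem.List.index? list2 last).getD 0 : Nat) : Int),
       (((PySem.List.index? list1 last).getD 0 : Nat) : Int))

-- ===== PRECONDITION & SPEC =====
-- Pre_ excludes lists sharing no element: there A (and B) raises UnboundLocalError.
def Pre_itemchecker (list1 : List String) (list2 : List String) : Prop :=
  ∃ x ∈ list1, x ∈ list2

instance (list1 : List String) (list2 : List String) : Decidable (Pre_itemchecker list1 list2) := by
  unfold Pre_itemchecker; infer_instance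

def pvWitness_itemchecker : List String × List String := (["a", "b"], ["b", "c"])

def Spec_itemchecker (list1 : List String) (list2 : List String) (out : List String × Int × Int) : Prop := out = itemchecker_alt list1 list2
instance (list1 : List String) (list2 : List String) (out : List String × Int × Int) : Decidable (Spec_itemchecker list1 list2 out) := by unfold Spec_itemchecker; infer_instance

-- ===== CLAIM (what is proved, stated in full; the proofs are below) =====
def Claim_equal_itemchecker : Prop := ∀ (list1 : List String) (list2 : List String), Dom_itemchecker list1 list2 → Pre_itemchecker list1 list2 → Spec_itemchecker list1 list2 (itemchecker list1 list2)

-- ===== LEMMAS AND PROOFS =====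

-- Invariant of A's loop over any suffix xs, with the full lists fixed.
theorem itemchecker_loop_eq (list1 list2 : List String) (xs : List String)
    (s : List String × Option Int × Option Int) :
    List.foldl
      (fun (st : List String × Option Int × Option Int) item =>
        if list2.contains item then
          (st.1 ++ [item],
           (PySem.List.index? list1 item).map (fun k => (k : Int)),
           (PySem.List.index? list2 item).map (fun k => (k : Int)))
        else st)
      s xs =
    (s.1 ++ xs.filter (fun x => list2.contains x),
     match xs.reverse.find? (fun x => list2.contains x) with
     | none => s.2
     | some v =>
        ((PySem.List.index? list1 v).map (fun k => (k : Int)),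
         (PySem.List.index? list2 v).map (fun k => (k : Int)))) := by
  induction xs generalizing s with
  | nil => simp
  | cons x xs ih =>
    simp only [List.foldl_cons, List.reverse_cons, List.find?_append, List.filter_cons]
    by_cases hx : x ∈ list2
    · rw [ih]
      cases hfind : xs.reverse.find? (fun x => list2.contains x)
      · simp [hx, List.find?]
      · simp [hx, hfind, List.find?]
    · rw [ih]
      cases hfind : xs.reverse.find? (fun x => list2.contains x)
      · simp [hx, List.find?]
      · simp [hx, hfind, List.find?]

-- ===== VERDICT (by name: the statement is the Claim_ definition above) =====

theorem itemchecker_spec : Claim_equal_itemchecker := by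
  intro list1 list2 _ hpre
  unfold Spec_itemchecker itemchecker itemchecker_alt
  rw [itemchecker_loop_eq]
  obtain ⟨x, hx1, hx2⟩ := hpre
  have hmem : x ∈ list1.reverse ∧ (fun y => list2.contains y) x = true := by
    simpa using ⟨hx1, hx2⟩
  have hsome : (list1.reverse.find? (fun y => list2.contains y)).isSome := by
    exact List.find?_isSome.mpr ⟨x, hmem.1, hmem.2⟩
  cases hfind : list1.reverse.find? (fun y => list2.contains y) with
  | none => rw [hfind] at hsome; simp at hsome
  | some v =>
    have hv := List.find?_some hfind
    have hv1 : v ∈ list1 := by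
      have := List.mem_of_find?_eq_some hfind
      simpa using this
    have hv2 : v ∈ list2 := by simpa using hv
    have h1 : (PySem.List.index? list1 v).isSome :=
      (PySem.List.index?_isSome_iff _ _).mpr hv1
    have h2 : (PySem.List.index? list2 v).isSome :=
      (PySem.List.index?_isSome_iff _ _).mpr hv2
    cases hi1 : PySem.List.index? list1 v with
    | none => rw [hi1] at h1; simp at h1
    | some k1 =>
      cases hi2 : PySem.List.index? list2 v with
      | none => rw [hi2] at h2; simp at h2
      | some k2 =>
        rw [PySem.List.index?_eq_idxOf?] at hi1 hi2
        simp [hi1, hi2]
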